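-- pv_equiv track=rewrite | github.com/pypi-data/pypi-mirror-275 | packages/iris-udl-to-xml/iris_udl_to_xml-0.1-py3-none-any.whl/udl2xml/util.py | get_quoted_string
-- ===== SOURCE A (Python) =====
-- def get_quoted_string(data:str) -> str:
--     """Returns a quoted string without removing quotes"""
--
--     assert data[0] == '"', "Data does not start with a quote"
--
--     value = '"'
--     i = 1
--     q = 0
--     while i < len(data):
--         c = data[i]
--         value += c
--         i += 1
--         if c != '"':
--             continue
--         elif i == len(data):
--             if q:
--                 raise ValueError(f"Unmatched quotes in {data}")
--             return value
--         elif q: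
--             q = 0
--         elif data[i] != '"':
--             return value
--         else:
--             q = 1
--
--     raise ValueError(f"End of string scanning for close quote in {data}")
-- ===== SOURCE B (Python) =====
-- def get_quoted_string(data: str) -> str:
--     """Returns a quoted string without removing quotes"""
--
--     assert data[0] == '"', "Data does not start with a quote"
--
--     i = 1
--     while (j := data.find('"', i)) != -1:
--         if j + 1 < len(data) and data[j + 1] == '"':
--             i = j + 2          # doubled-quote escape: jump past the pair
--         else:
--             return data[:j + 1]
--     raise ValueError(f"End of string scanning for close quote in {data}")
-- ===== Notes on version B (the rewrite author's own statement) =====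
-- stated objective: idiomatic
-- what changed: Replaces the per-character state machine (value accumulator and q flag) with a loop that jumps directly to the next quote via str.find and slices the result, returning data[:j+1] at the first quote not doubled; Pre_ excludes only inputs where A raises (missing leading quote, or no closing quote under the doubled-quote rule).
-- outside the precondition, e.g. on get_quoted_string('"'): A raises ValueError, B raises ValueError
import Mathlib
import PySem

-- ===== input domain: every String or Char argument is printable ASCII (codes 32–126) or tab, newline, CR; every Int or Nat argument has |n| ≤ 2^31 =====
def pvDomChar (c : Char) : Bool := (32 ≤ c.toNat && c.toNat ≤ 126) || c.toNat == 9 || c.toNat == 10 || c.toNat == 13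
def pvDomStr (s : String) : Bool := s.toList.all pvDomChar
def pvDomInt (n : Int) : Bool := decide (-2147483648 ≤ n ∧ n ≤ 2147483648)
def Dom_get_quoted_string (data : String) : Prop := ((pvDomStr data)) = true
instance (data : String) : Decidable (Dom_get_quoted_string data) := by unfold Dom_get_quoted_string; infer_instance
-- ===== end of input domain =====

-- B replaces A's per-character state machine (q flag) by jumping from quote to
-- quote with find (takeWhile/dropWhile here) and slicing; objective: idiomatic.

-- ===== PORT A =====
-- A's while loop: value accumulator, position (the remaining suffix), q flag;
-- 'none' stands for the Python ValueErrors.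
def goA : List Char → List Char → Bool → Option (List Char)
  | [], _, _ => none  -- fell off the loop: "End of string scanning for close quote"
  | c :: t, value, q =>
    let value' := value ++ [c]
    if c ≠ '"' then goA t value' q   -- continue
    else match t with
      | [] => if q then none else some value'  -- i == len(data): Unmatched / return
      | d :: _ =>
        if q then goA t value' false
        else if d ≠ '"' then some value'
        else goA t value' true

def get_quoted_string (data : String) : String :=
  match data.toList with
  | [] => ""                        -- IndexError on data[0] (outside Pre_)
  | c :: rest =>
    if c = '"' then                 -- assert data[0] == '"'
      match goA rest ['"'] false with
      | some v => String.ofList v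
      | none => ""                  -- ValueError (outside Pre_)
    else ""                         -- AssertionError (outside Pre_)

-- ===== PORT B =====
-- Source B's data.find('"', i) = skip the non-quote prefix (takeWhile/dropWhile);
-- acc is the already-confirmed prefix data[:i]; 'none' = the ValueError.
def goB (acc rest : List Char) : Option (List Char) :=
  if hr : rest.dropWhile (fun c => c ≠ '"') = [] then none  -- find returned -1: ValueError
  else if hq : (rest.dropWhile (fun c => c ≠ '"')).tail.head? = some '"' then
    -- doubled-quote escape: i = j + 2
    goB (acc ++ rest.takeWhile (fun c => c ≠ '"') ++ ['"', '"'])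
        (rest.dropWhile (fun c => c ≠ '"')).tail.tail
  else some (acc ++ rest.takeWhile (fun c => c ≠ '"') ++ ['"'])  -- closing quote: data[:j+1]
termination_by rest.length
decreasing_by
  have h1 := List.length_dropWhile_le (fun c => decide (c ≠ '"')) rest
  generalize hg : rest.dropWhile (fun c => decide (c ≠ '"')) = r at *
  rcases r with _ | ⟨x, _ | ⟨y, b⟩⟩
  · exact absurd rfl hr
  · simp at hq
  · simp at h1 ⊢; omega

def get_quoted_string_alt (data : String) : String :=
  match data.toList with
  | [] => ""                        -- IndexError on data[0] (outside Pre_)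
  | c :: rest =>
    if c = '"' then                 -- assert data[0] == '"'
      match goB ['"'] rest with
      | some v => String.ofList v
      | none => ""                  -- ValueError (outside Pre_)
    else ""                         -- AssertionError (outside Pre_)

-- ===== PRECONDITION & SPEC =====
-- Pre_ excludes exactly the inputs where Python A raises: data not starting with
-- '"' (AssertionError/IndexError) or no closing quote under the doubled-quote
-- rule (ValueError).  A closing quote is a position j ≥ 1 holding '"', not
-- followed by another '"', with an even number of '"' in data[:j+1].
def Pre_get_quoted_string (data : String) : Prop :=
  data.toList.head? = some '"' ∧
  ∃ j < data.toList.length, 1 ≤ j ∧ data.toList.getD j ' ' = '"' ∧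
    (j + 1 = data.toList.length ∨ data.toList.getD (j + 1) ' ' ≠ '"') ∧
    ((data.toList.take (j + 1)).count '"') % 2 = 0
instance (data : String) : Decidable (Pre_get_quoted_string data) := by
  unfold Pre_get_quoted_string; infer_instance

def pvWitness_get_quoted_string : String := "\"ab\""

def Spec_get_quoted_string (data : String) (out : String) : Prop := out = get_quoted_string_alt data
instance (data : String) (out : String) : Decidable (Spec_get_quoted_string data out) := by unfold Spec_get_quoted_string; infer_instance

-- ===== CLAIM (what is proved, stated in full; the proofs are below) =====
def Claim_equal_get_quoted_string : Prop := ∀ (data : String), Dom_get_quoted_string data → Pre_get_quoted_string data → Spec_get_quoted_string data (get_quoted_string data)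

-- ===== LEMMAS AND PROOFS =====

-- small-step equations for goA
lemma goA_nil (v : List Char) (q : Bool) : goA [] v q = none := rfl

lemma goA_nonquote (c : Char) (t v : List Char) (q : Bool) (hc : c ≠ '"') :
    goA (c :: t) v q = goA t (v ++ [c]) q := by
  simp only [goA, if_pos hc]

lemma goA_quote_nil (v : List Char) (q : Bool) :
    goA ['"'] v q = if q then none else some (v ++ ['"']) := by
  simp [goA]

lemma goA_quote_cons (d : Char) (t v : List Char) (q : Bool) :
    goA ('"' :: d :: t) v q =
      if q then goA (d :: t) (v ++ ['"']) false
      else if d ≠ '"' then some (v ++ ['"'])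
      else goA (d :: t) (v ++ ['"']) true := by
  simp [goA]

-- small-step equations for goB
lemma goB_nil (acc : List Char) : goB acc [] = none := by rw [goB]; simp

lemma goB_quote_nil (acc : List Char) : goB acc ['"'] = some (acc ++ ['"']) := by
  rw [goB]; simp

lemma goB_quote_cons_nonquote (acc : List Char) (d : Char) (t : List Char) (hd : d ≠ '"') :
    goB acc ('"' :: d :: t) = some (acc ++ ['"']) := by
  rw [goB]; simp [hd]

lemma goB_quote_quote (acc t : List Char) :
    goB acc ('"' :: '"' :: t) = goB (acc ++ ['"', '"']) t := by
  conv_lhs => rw [goB]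
  simp

lemma goB_cons_nonquote (acc : List Char) (c : Char) (t : List Char) (hc : c ≠ '"') :
    goB acc (c :: t) = goB (acc ++ [c]) t := by
  conv_lhs => rw [goB]
  conv_rhs => rw [goB]
  have hcb : (decide ¬ c = '"') = true := by simp [hc]
  simp only [List.takeWhile_cons, List.dropWhile_cons, hcb, if_true, ne_eq]
  split_ifs <;> simp [List.append_assoc]

-- the two loops compute the same option-valued result on every suffix
lemma goA_eq_goB : ∀ (n : ℕ) (rest acc : List Char), rest.length ≤ n →
    goA rest acc false = goB acc rest := by
  intro n
  induction n with
  | zero =>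
    intro rest acc h
    have : rest = [] := List.eq_nil_of_length_eq_zero (Nat.le_zero.mp h)
    subst this
    rw [goA_nil, goB_nil]
  | succ n ih =>
    intro rest acc h
    rcases rest with _ | ⟨c, t⟩
    · rw [goA_nil, goB_nil]
    · by_cases hc : c = '"'
      · subst hc
        rcases t with _ | ⟨d, t'⟩
        · rw [goA_quote_nil, goB_quote_nil]; simp
        · by_cases hd : d = '"'
          · subst hd
            rw [goA_quote_cons, goB_quote_quote]
            simp only [ne_eq, not_true_eq_false, if_false, Bool.false_eq_true]
            rcases t' with _ | ⟨e, t''⟩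
            · rw [goA_quote_nil, goB_nil]; simp
            · rw [goA_quote_cons]
              simp only [if_true]
              have hlen : (e :: t'').length ≤ n := by simp at h ⊢; omega
              rw [ih (e :: t'') (acc ++ ['"'] ++ ['"']) hlen]
              simp [List.append_assoc]
          · rw [goA_quote_cons, goB_quote_cons_nonquote acc d t' hd]
            simp [hd]
      · have hlen : t.length ≤ n := by simp at h; omega
        rw [goA_nonquote c t acc false hc, goB_cons_nonquote acc c t hc]
        exact ih t (acc ++ [c]) hlen

lemma ports_agree (data : String) : get_quoted_string data = get_quoted_string_alt data := by
  unfold get_quoted_string get_quoted_string_alt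
  rcases data.toList with _ | ⟨c, rest⟩
  · rfl
  · by_cases hc : c = '"'
    · subst hc
      simp only [if_true]
      rw [goA_eq_goB rest.length rest ['"'] le_rfl]
    · simp [hc]

-- ===== VERDICT (by name: the statement is the Claim_ definition above) =====
theorem get_quoted_string_spec : Claim_equal_get_quoted_string := by
  intro data _ _
  unfold Spec_get_quoted_string
  exact ports_agree data
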